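-- pv_equiv track=rewrite | github.com/ShahadIshraq/adventofcode | src/main/kotlin/adventofcode2024/day2/day_2_0.py | is_line_safe
-- ===== SOURCE A (Python) =====
-- def is_line_safe(line):
--     increasing = all(line[i] < line[i + 1] for i in range(len(line) - 1))
--     decreasing = all(line[i] > line[i + 1] for i in range(len(line) - 1))
--     if not increasing and not decreasing:
--         return False
--
--     # difference two adjacent items can not be more than 3
--     for i in range(len(line) - 1):
--         if abs(line[i] - line[i + 1]) > 3:
--             return False
--     return True
-- ===== SOURCE B (Python) =====
-- def is_line_safe(line):
--     if len(line) < 2: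
--         return True
--     d0 = line[1] - line[0]
--     if d0 == 0 or abs(d0) > 3:
--         return False
--     lo, hi = (1, 3) if d0 > 0 else (-3, -1)
--     prev = line[1]
--     for x in line[2:]:
--         if not (lo <= x - prev <= hi):
--             return False
--         prev = x
--     return True
-- ===== Notes on version B (the rewrite author's own statement) =====
-- stated objective: alternative
-- what changed: B is a single early-exiting pass with an accumulator: the first step fixes the admissible difference range (1..3 or -3..-1) and one loop carrying the previous element checks each later step against it, replacing A's three separate index-based all() scans over the whole list.
import Mathlib
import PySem

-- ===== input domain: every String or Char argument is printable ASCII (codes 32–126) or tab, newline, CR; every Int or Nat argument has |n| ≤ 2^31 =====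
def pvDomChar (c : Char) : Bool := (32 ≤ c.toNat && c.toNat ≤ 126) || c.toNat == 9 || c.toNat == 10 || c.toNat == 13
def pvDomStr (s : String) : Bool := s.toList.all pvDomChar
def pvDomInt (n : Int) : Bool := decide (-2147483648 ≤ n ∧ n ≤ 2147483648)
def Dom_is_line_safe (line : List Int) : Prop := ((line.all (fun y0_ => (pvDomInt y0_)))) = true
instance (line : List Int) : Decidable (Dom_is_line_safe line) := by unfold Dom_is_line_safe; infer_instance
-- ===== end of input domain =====

-- B replaces A's three whole-list index scans with ONE early-exiting pass carrying the previous
-- element, the admissible step range being fixed by the first step; objective: alternative.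

-- ===== PORT A =====
-- indices drawn from range(len(line)-1) are always in range, so getD's default is never used
def is_line_safe (line : List Int) : Bool :=
  let increasing := (List.range (line.length - 1)).all
      (fun i => decide (line.getD i 0 < line.getD (i + 1) 0))
  let decreasing := (List.range (line.length - 1)).all
      (fun i => decide (line.getD i 0 > line.getD (i + 1) 0))
  if !increasing && !decreasing then false
  else (List.range (line.length - 1)).all
      (fun i => decide ((line.getD i 0 - line.getD (i + 1) 0).natAbs ≤ 3))

-- ===== PORT B =====
-- the for-loop over line[2:] carrying prev, as structural recursion
def pvGoB (lo hi prev : Int) : List Int → Bool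
  | [] => true
  | x :: rest => if lo ≤ x - prev ∧ x - prev ≤ hi then pvGoB lo hi x rest else false

def is_line_safe_alt (line : List Int) : Bool :=
  match line with
  | [] => true
  | [_] => true
  | a :: b :: rest =>
    let d0 := b - a
    if d0 = 0 ∨ 3 < d0.natAbs then false
    else if 0 < d0 then pvGoB 1 3 b rest
    else pvGoB (-3) (-1) b rest

-- ===== PRECONDITION & SPEC =====
def Spec_is_line_safe (line : List Int) (out : Bool) : Prop := out = is_line_safe_alt line
instance (line : List Int) (out : Bool) : Decidable (Spec_is_line_safe line out) := by unfold Spec_is_line_safe; infer_instance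

-- ===== CLAIM (what is proved, stated in full; the proofs are below) =====
def Claim_equal_is_line_safe : Prop := ∀ (line : List Int), Dom_is_line_safe line → Spec_is_line_safe line (is_line_safe line)

-- ===== LEMMAS AND PROOFS =====

-- adjacent-pair "all" over a list (proof-only helper)
def pvAllAdj (P : Int → Int → Bool) : List Int → Bool
  | x :: y :: r => P x y && pvAllAdj P (y :: r)
  | _ => true

-- A's index scans over range(len-1) are adjacent-pair scans
theorem pv_range_all (P : Int → Int → Bool) (l : List Int) :
    (List.range (l.length - 1)).all (fun i => P (l.getD i 0) (l.getD (i + 1) 0))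
      = pvAllAdj P l := by
  induction l with
  | nil => rfl
  | cons x t ih =>
    cases t with
    | nil => rfl
    | cons y r =>
      show (List.range (r.length + 1)).all _ = _
      rw [List.range_succ_eq_map, List.all_cons, List.all_map]
      simp only [Function.comp_def, List.getD_cons_succ, List.getD_cons_zero]
      rw [show ((y :: r : List Int).length - 1) = r.length from by simp] at ih
      simp only [List.getD_cons_succ] at ih
      rw [ih]
      rfl

-- B's loop checks every adjacent pair against the fixed range
theorem pv_goB (lo hi : Int) (prev : Int) (rest : List Int) :
    pvGoB lo hi prev rest
      = pvAllAdj (fun a b => decide (lo ≤ b - a ∧ b - a ≤ hi)) (prev :: rest) := by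
  induction rest generalizing prev with
  | nil => rfl
  | cons x r ih =>
    show (if lo ≤ x - prev ∧ x - prev ≤ hi then pvGoB lo hi x r else false) = _
    rw [ih]
    by_cases h : lo ≤ x - prev ∧ x - prev ≤ hi <;> simp [pvAllAdj, h]

theorem pv_allAdj_and (P R : Int → Int → Bool) (l : List Int) :
    pvAllAdj (fun a b => P a b && R a b) l = (pvAllAdj P l && pvAllAdj R l) := by
  induction l with
  | nil => rfl
  | cons x t ih =>
    cases t with
    | nil => rfl
    | cons y r =>
      simp only [pvAllAdj, ih]
      cases P x y <;> cases R x y <;> cases pvAllAdj P (y :: r) <;> cases pvAllAdj R (y :: r) <;> rfl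

theorem pv_allAdj_congr (P Q : Int → Int → Bool) (h : ∀ a b, P a b = Q a b) (l : List Int) :
    pvAllAdj P l = pvAllAdj Q l := by
  induction l with
  | nil => rfl
  | cons x t ih =>
    cases t with
    | nil => rfl
    | cons y r => simp only [pvAllAdj] at ih ⊢; rw [h, ih]

-- A reduced to "all steps in 1..3, or all steps in -3..-1"
theorem pv_A_or (l : List Int) :
    is_line_safe l
      = (pvAllAdj (fun a b => decide (1 ≤ b - a ∧ b - a ≤ 3)) l
          || pvAllAdj (fun a b => decide (-3 ≤ b - a ∧ b - a ≤ -1)) l) := by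
  unfold is_line_safe
  rw [pv_range_all (fun a b => decide (a < b)),
      pv_range_all (fun a b => decide (a > b)),
      pv_range_all (fun a b => decide ((a - b).natAbs ≤ 3))]
  have h1 : pvAllAdj (fun a b => decide (1 ≤ b - a ∧ b - a ≤ 3)) l
      = (pvAllAdj (fun a b => decide (a < b)) l
          && pvAllAdj (fun a b => decide ((a - b).natAbs ≤ 3)) l) := by
    rw [← pv_allAdj_and]
    exact pv_allAdj_congr _ _ (fun a b => by
      rw [Bool.eq_iff_iff]; simp only [Bool.and_eq_true, decide_eq_true_eq]; omega) l
  have h2 : pvAllAdj (fun a b => decide (-3 ≤ b - a ∧ b - a ≤ -1)) l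
      = (pvAllAdj (fun a b => decide (a > b)) l
          && pvAllAdj (fun a b => decide ((a - b).natAbs ≤ 3)) l) := by
    rw [← pv_allAdj_and]
    exact pv_allAdj_congr _ _ (fun a b => by
      rw [Bool.eq_iff_iff]; simp only [Bool.and_eq_true, decide_eq_true_eq]
      constructor
      · intro h; exact ⟨by omega, by omega⟩
      · intro h; exact ⟨by omega, by omega⟩) l
  rw [h1, h2]
  cases hp : pvAllAdj (fun a b => decide (a < b)) l <;>
    cases hq : pvAllAdj (fun a b => decide (a > b)) l <;>
      cases hr : pvAllAdj (fun a b => decide ((a - b).natAbs ≤ 3)) l <;> rfl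

-- ===== VERDICT (by name: the statement is the Claim_ definition above) =====
theorem is_line_safe_spec : Claim_equal_is_line_safe := by
  intro line _
  unfold Spec_is_line_safe
  rw [pv_A_or]
  match line with
  | [] => rfl
  | [_] => rfl
  | a :: b :: rest =>
    unfold is_line_safe_alt
    simp only
    by_cases h0 : b - a = 0 ∨ 3 < (b - a).natAbs
    · rw [if_pos h0]
      have e1 : (decide (1 ≤ b - a ∧ b - a ≤ 3)) = false := by
        simp only [decide_eq_false_iff_not]; omega
      have e2 : (decide (-3 ≤ b - a ∧ b - a ≤ -1)) = false := by
        simp only [decide_eq_false_iff_not]; omega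
      simp only [pvAllAdj, e1, e2, Bool.false_and, Bool.or_self]
    · rw [if_neg h0]
      by_cases hs : 0 < b - a
      · rw [if_pos hs, pv_goB]
        have e1 : (decide (1 ≤ b - a ∧ b - a ≤ 3)) = true := by
          simp only [decide_eq_true_eq]; omega
        have e2 : (decide (-3 ≤ b - a ∧ b - a ≤ -1)) = false := by
          simp only [decide_eq_false_iff_not]; omega
        show (pvAllAdj _ (a :: b :: rest) || pvAllAdj _ (a :: b :: rest)) = _
        simp only [pvAllAdj, e1, e2, Bool.true_and, Bool.false_and, Bool.or_false]
      · rw [if_neg hs, pv_goB]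
        have e1 : (decide (1 ≤ b - a ∧ b - a ≤ 3)) = false := by
          simp only [decide_eq_false_iff_not]; omega
        have e2 : (decide (-3 ≤ b - a ∧ b - a ≤ -1)) = true := by
          simp only [decide_eq_true_eq]; omega
        show (pvAllAdj _ (a :: b :: rest) || pvAllAdj _ (a :: b :: rest)) = _
        simp only [pvAllAdj, e1, e2, Bool.true_and, Bool.false_and, Bool.false_or]
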